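-- pv_equiv track=rewrite | github.com/toxzak-svg/kaggle-agi-submission | tasks/reversion.py | retrieve_validity_window
-- ===== SOURCE A (Python) =====
-- def retrieve_validity_window(domain, subject, as_of_day, facts):
--     """
--     Model D retrieval: find the most recent fact where as_of_day falls
--     within [t_valid_from, t_valid_until].
--     """
--     candidates = []
--     for f in facts:
--         if f.get("domain") != domain or f.get("subject") != subject:
--             continue
--         valid_from = int(f.get("t_valid_from", 0))
--         valid_until = int(f.get("t_valid_until", -1))
--         if as_of_day < valid_from:
--             continue
--         if valid_until != -1 and as_of_day > valid_until:
--             continue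
--         candidates.append((f, valid_from))
--
--     if not candidates:
--         return None
--
--     # Most recent = highest t_valid_from
--     best = max(candidates, key=lambda x: x[1])
--     return best[0]
-- ===== SOURCE B (Python) =====
-- def retrieve_validity_window(domain, subject, as_of_day, facts):
--     """Two staged passes instead of a candidate list + max reduction:
--     pass 1 computes only the latest qualifying window start (an int),
--     pass 2 returns the first fact whose window starts exactly there."""
--     def window_start(f):
--         """valid_from if f matches domain/subject and covers as_of_day, else None."""
--         if f.get("domain") != domain or f.get("subject") != subject:
--             return None
--         vf = int(f.get("t_valid_from", 0))
--         vu = int(f.get("t_valid_until", -1))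
--         if as_of_day < vf or (vu != -1 and as_of_day > vu):
--             return None
--         return vf
--
--     latest = None
--     for f in facts:
--         vf = window_start(f)
--         if vf is not None and (latest is None or vf > latest):
--             latest = vf
--     if latest is None:
--         return None
--     return next(f for f in facts if window_start(f) == latest)
-- ===== Notes on version B (the rewrite author's own statement) =====
-- stated objective: alternative
-- what changed: B replaces A's build-a-candidate-list-then-max(key) reduction with two staged passes: the first tracks only the maximal qualifying window-start integer, the second returns the first fact that starts at exactly that day, so no list of (fact, start) pairs is ever built.
import Mathlib
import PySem

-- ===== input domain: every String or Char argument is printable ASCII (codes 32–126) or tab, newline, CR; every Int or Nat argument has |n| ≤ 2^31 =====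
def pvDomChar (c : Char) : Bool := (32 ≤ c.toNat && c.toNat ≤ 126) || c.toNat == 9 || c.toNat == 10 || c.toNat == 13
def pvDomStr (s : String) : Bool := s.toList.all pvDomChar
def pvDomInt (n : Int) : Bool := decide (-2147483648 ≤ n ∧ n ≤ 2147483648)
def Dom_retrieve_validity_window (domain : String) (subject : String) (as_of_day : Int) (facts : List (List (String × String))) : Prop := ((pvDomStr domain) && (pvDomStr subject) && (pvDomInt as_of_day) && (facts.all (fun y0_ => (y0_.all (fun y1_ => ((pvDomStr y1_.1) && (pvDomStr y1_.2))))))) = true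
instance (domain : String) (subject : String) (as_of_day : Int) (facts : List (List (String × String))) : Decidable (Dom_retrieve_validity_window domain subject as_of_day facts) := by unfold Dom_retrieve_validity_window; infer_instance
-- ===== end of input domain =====

-- B replaces A's candidate-list + max reduction by two staged passes: a max of the qualifying window starts, then a first-match scan (alternative decomposition, O(1) extra space).


-- f.get(k): first-match lookup in the fact's association list (the Python dict)
def pvGetStr? (f : List (String × String)) (k : String) : Option String := (PySem.Dict.mk f).get? k

-- int(f.get(k, d)): present key is parsed with PySem.Int.ofStr? (none = ValueError, excluded by Pre_,
-- so the .getD 0 default is never reached inside Pre_); absent key yields the int default d.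
def pvGetInt (f : List (String × String)) (k : String) (d : Int) : Int :=
  match pvGetStr? f k with
  | some s => (PySem.Int.ofStr? s).getD 0
  | none => d

-- ===== PORT A =====
-- the body of A's `for f in facts` loop (filter + candidate append), as one step function
def pvFilterStep (domain : String) (subject : String) (as_of_day : Int)
    (acc : List ((List (String × String)) × Int)) (f : List (String × String)) :
    List ((List (String × String)) × Int) :=
  if pvGetStr? f "domain" ≠ some domain ∨ pvGetStr? f "subject" ≠ some subject then acc
  else
    let valid_from := pvGetInt f "t_valid_from" 0
    let valid_until := pvGetInt f "t_valid_until" (-1)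
    if as_of_day < valid_from then acc
    else if valid_until ≠ -1 ∧ as_of_day > valid_until then acc
    else acc ++ [(f, valid_from)]

def retrieve_validity_window (domain : String) (subject : String) (as_of_day : Int) (facts : List (List (String × String))) : Option (List (String × String)) :=
  match facts.foldl (pvFilterStep domain subject as_of_day) [] with
  | [] => none
  | c :: rest => some (rest.foldl (fun b x => if x.2 > b.2 then x else b) c).1

-- ===== PORT B =====
-- B's helper window_start(f): the window start if f matches domain/subject and covers as_of_day, else None
def pvWindowStart? (domain : String) (subject : String) (as_of_day : Int) (f : List (String × String)) : Option Int :=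
  if pvGetStr? f "domain" ≠ some domain ∨ pvGetStr? f "subject" ≠ some subject then none
  else
    let vf := pvGetInt f "t_valid_from" 0
    let vu := pvGetInt f "t_valid_until" (-1)
    if as_of_day < vf ∨ (vu ≠ -1 ∧ as_of_day > vu) then none
    else some vf

-- the body of B's first loop: latest qualifying window start so far (an Option Int only)
def pvLatestStep (domain : String) (subject : String) (as_of_day : Int)
    (latest : Option Int) (f : List (String × String)) : Option Int :=
  match pvWindowStart? domain subject as_of_day f with
  | none => latest
  | some vf =>
    match latest with
    | none => some vf
    | some b => if vf > b then some vf else latest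

-- B's second pass `next(f for f in facts if window_start(f) == latest)` is a first-match scan: List.find?
def retrieve_validity_window_alt (domain : String) (subject : String) (as_of_day : Int) (facts : List (List (String × String))) : Option (List (String × String)) :=
  match facts.foldl (pvLatestStep domain subject as_of_day) none with
  | none => none
  | some m => facts.find? (fun f => pvWindowStart? domain subject as_of_day f == some m)

-- ===== PRECONDITION & SPEC =====
-- Pre_ excludes exactly the inputs on which Python A raises ValueError: a fact matching domain and
-- subject whose t_valid_from / t_valid_until string int() cannot parse (B raises there too).
def Pre_retrieve_validity_window (domain : String) (subject : String) (as_of_day : Int) (facts : List (List (String × String))) : Prop :=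
  (facts.all (fun f =>
    !((pvGetStr? f "domain" == some domain) && (pvGetStr? f "subject" == some subject)) ||
    (((pvGetStr? f "t_valid_from").elim true (fun s => (PySem.Int.ofStr? s).isSome)) &&
     ((pvGetStr? f "t_valid_until").elim true (fun s => (PySem.Int.ofStr? s).isSome))))) = true
instance (domain : String) (subject : String) (as_of_day : Int) (facts : List (List (String × String))) : Decidable (Pre_retrieve_validity_window domain subject as_of_day facts) := by unfold Pre_retrieve_validity_window; infer_instance

def pvWitness_retrieve_validity_window : String × String × Int × (List (List (String × String))) :=
  ("d", "s", 5, [[("domain", "d"), ("subject", "s"), ("t_valid_from", "1")]])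

def Spec_retrieve_validity_window (domain : String) (subject : String) (as_of_day : Int) (facts : List (List (String × String))) (out : Option (List (String × String))) : Prop := out = retrieve_validity_window_alt domain subject as_of_day facts
instance (domain : String) (subject : String) (as_of_day : Int) (facts : List (List (String × String))) (out : Option (List (String × String))) : Decidable (Spec_retrieve_validity_window domain subject as_of_day facts out) := by unfold Spec_retrieve_validity_window; infer_instance

-- ===== CLAIM (what is proved, stated in full; the proofs are below) =====
def Claim_equal_retrieve_validity_window : Prop := ∀ (domain : String) (subject : String) (as_of_day : Int) (facts : List (List (String × String))), Dom_retrieve_validity_window domain subject as_of_day facts → Pre_retrieve_validity_window domain subject as_of_day facts → Spec_retrieve_validity_window domain subject as_of_day facts (retrieve_validity_window domain subject as_of_day facts)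

-- ===== LEMMAS AND PROOFS =====

-- A's candidate list, written as a filterMap through B's window_start helper
def pvCands (domain subject : String) (as_of_day : Int) (facts : List (List (String × String))) :
    List ((List (String × String)) × Int) :=
  facts.filterMap (fun f => (pvWindowStart? domain subject as_of_day f).map (fun v => (f, v)))

-- Python's max(key=...) as a value: first element of the list attaining the maximal key
def pyMax? (xs : List ((List (String × String)) × Int)) : Option ((List (String × String)) × Int) :=
  match xs with
  | [] => none
  | c :: rest => some (rest.foldl (fun b x => if x.2 > b.2 then x else b) c)

-- max of two optional ints (how B's pass 1 combines information)
def omax : Option Int → Option Int → Option Int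
  | none, b => b
  | some x, none => some x
  | some x, some y => some (max x y)

-- one A-iteration appends exactly the (fact, start) pair that window_start admits
theorem filterStep_eq (domain subject : String) (as_of_day : Int)
    (acc : List ((List (String × String)) × Int)) (f : List (String × String)) :
    pvFilterStep domain subject as_of_day acc f
      = acc ++ ((pvWindowStart? domain subject as_of_day f).map (fun v => (f, v))).toList := by
  unfold pvFilterStep pvWindowStart?
  split_ifs <;> simp_all <;> split_ifs <;> simp_all <;> omega

-- A's whole loop builds acc ++ candidate list
theorem filter_loop_eq (domain subject : String) (as_of_day : Int)
    (facts : List (List (String × String))) (acc : List ((List (String × String)) × Int)) :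
    facts.foldl (pvFilterStep domain subject as_of_day) acc
      = acc ++ pvCands domain subject as_of_day facts := by
  induction facts generalizing acc with
  | nil => simp [pvCands]
  | cons f rest ih =>
    rw [List.foldl_cons, ih, filterStep_eq]
    cases h : pvWindowStart? domain subject as_of_day f <;> simp [pvCands, h]

-- the first-max foldl restarted from x
theorem foldl_best (x : (List (String × String)) × Int) (xs : List ((List (String × String)) × Int)) :
    xs.foldl (fun b y => if y.2 > b.2 then y else b) x
      = match pyMax? xs with | none => x | some b => if b.2 > x.2 then b else x := by
  induction xs generalizing x with
  | nil => rfl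
  | cons y ys ih =>
    rw [List.foldl_cons, ih]
    have hy : pyMax? (y :: ys) = some (ys.foldl (fun b x => if x.2 > b.2 then x else b) y) := rfl
    rw [hy, ih y]
    cases h : pyMax? ys <;> simp only [] <;> split_ifs <;> first | rfl | omega

theorem pyMax?_cons (x : (List (String × String)) × Int) (xs : List ((List (String × String)) × Int)) :
    pyMax? (x :: xs) = some (match pyMax? xs with | none => x | some b => if b.2 > x.2 then b else x) := by
  have : pyMax? (x :: xs) = some (xs.foldl (fun b y => if y.2 > b.2 then y else b) x) := rfl
  rw [this, foldl_best]

theorem omax_assoc (a : Option Int) (v : Int) (m : Option Int) :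
    omax (omax a (some v)) m = omax a (omax (some v) m) := by
  cases a <;> cases m <;> simp [omax, max_assoc]

-- B's pass 1 computes the max window start = the key of A's max candidate
theorem latest_eq (domain subject : String) (as_of_day : Int)
    (facts : List (List (String × String))) (acc : Option Int) :
    facts.foldl (pvLatestStep domain subject as_of_day) acc
      = omax acc ((pyMax? (pvCands domain subject as_of_day facts)).map Prod.snd) := by
  induction facts generalizing acc with
  | nil => cases acc <;> rfl
  | cons f rest ih =>
    rw [List.foldl_cons, ih]
    cases h : pvWindowStart? domain subject as_of_day f with
    | none =>
      have hs : pvLatestStep domain subject as_of_day acc f = acc := by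
        unfold pvLatestStep; rw [h]
      have hc : pvCands domain subject as_of_day (f :: rest)
          = pvCands domain subject as_of_day rest := by simp [pvCands, h]
      rw [hs, hc]
    | some vf =>
      have hs : pvLatestStep domain subject as_of_day acc f = omax acc (some vf) := by
        unfold pvLatestStep
        rw [h]
        cases acc with
        | none => rfl
        | some b => dsimp only [omax]; split_ifs <;> (congr 1; omega)
      have hc : pvCands domain subject as_of_day (f :: rest)
          = (f, vf) :: pvCands domain subject as_of_day rest := by simp [pvCands, h]
      rw [hs, hc, pyMax?_cons, omax_assoc]
      congr 1
      cases hm : pyMax? (pvCands domain subject as_of_day rest) with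
      | none => rfl
      | some b =>
        dsimp only [omax, Option.map_some]
        congr 1
        split_ifs <;> first | omega | (simp_all; omega) | simp_all

-- B's pass 2 finds exactly A's max candidate's fact
theorem find_eq (domain subject : String) (as_of_day : Int)
    (facts : List (List (String × String))) (b : (List (String × String)) × Int)
    (h : pyMax? (pvCands domain subject as_of_day facts) = some b) :
    facts.find? (fun f => pvWindowStart? domain subject as_of_day f == some b.2) = some b.1 := by
  induction facts generalizing b with
  | nil => simp [pvCands, pyMax?] at h
  | cons f rest ih =>
    cases hq : pvWindowStart? domain subject as_of_day f with
    | none =>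
      have hc : pvCands domain subject as_of_day (f :: rest)
          = pvCands domain subject as_of_day rest := by simp [pvCands, hq]
      rw [hc] at h
      rw [List.find?_cons]
      simp [hq]
      exact ih b h
    | some vf =>
      have hc : pvCands domain subject as_of_day (f :: rest)
          = (f, vf) :: pvCands domain subject as_of_day rest := by simp [pvCands, hq]
      rw [hc, pyMax?_cons] at h
      cases hm : pyMax? (pvCands domain subject as_of_day rest) with
      | none =>
        rw [hm] at h
        dsimp only at h
        injection h with h
        subst h
        simp [List.find?_cons, hq]
      | some c =>
        rw [hm] at h
        dsimp only at h
        by_cases hlt : c.2 > vf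
        · rw [if_pos hlt] at h
          injection h with h
          subst h
          rw [List.find?_cons]
          have hff : (pvWindowStart? domain subject as_of_day f == some c.2) = false := by
            simp [hq]; omega
          rw [hff]
          exact ih c hm
        · rw [if_neg hlt] at h
          injection h with h; subst h
          simp [List.find?_cons, hq]

-- ===== VERDICT (by name: the statement is the Claim_ definition above) =====
theorem retrieve_validity_window_spec : Claim_equal_retrieve_validity_window := by
  intro domain subject as_of_day facts _ _
  unfold Spec_retrieve_validity_window retrieve_validity_window retrieve_validity_window_alt
  rw [filter_loop_eq, List.nil_append, latest_eq]
  cases hc : pvCands domain subject as_of_day facts with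
  | nil => rfl
  | cons c rest =>
    have hm : pyMax? (pvCands domain subject as_of_day facts)
        = some (rest.foldl (fun b x => if x.2 > b.2 then x else b) c) := by rw [hc]; rfl
    have e : omax none (Option.map Prod.snd (pyMax? (c :: rest)))
        = some ((rest.foldl (fun b x => if x.2 > b.2 then x else b) c).2) := rfl
    rw [e]
    dsimp only
    exact (find_eq domain subject as_of_day facts _ hm).symm
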